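-- pv_equiv track=rewrite | github.com/sonawane-bhushan/advent-of-code | AOC 2023/advent-13-1.py | getRowSymmetry
-- ===== SOURCE A (Python) =====
-- def getRowSymmetry(pattern: list):
--     for i in range(1, len(pattern)):
--         j = 0
--         while True:
--             if(pattern[i - j - 1] != pattern[i + j]):
--                 break
--             j += 1
--             if((i - j - 1) == -1 or (i + j) == len(pattern)):
--                 return i
--     return 0
-- ===== SOURCE B (Python) =====
-- def getRowSymmetry(pattern: list):
--     n = len(pattern)
--     return next((i for i in range(1, n)
--                  if pattern[i - 1] == pattern[i]
--                  and pattern[i - min(i, n - i):i][::-1] == pattern[i:i + min(i, n - i)]),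
--                 0)
-- ===== Notes on version B (the rewrite author's own statement) =====
-- stated objective: simpler
-- what changed: A expands outward from each candidate axis with an inner while-loop of element-by-element comparisons; B tests each axis in one shot (after a cheap adjacent-rows guard) by comparing the reversed slice above the axis with the slice below it, picking the first match with next(..., 0).
import Mathlib
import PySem

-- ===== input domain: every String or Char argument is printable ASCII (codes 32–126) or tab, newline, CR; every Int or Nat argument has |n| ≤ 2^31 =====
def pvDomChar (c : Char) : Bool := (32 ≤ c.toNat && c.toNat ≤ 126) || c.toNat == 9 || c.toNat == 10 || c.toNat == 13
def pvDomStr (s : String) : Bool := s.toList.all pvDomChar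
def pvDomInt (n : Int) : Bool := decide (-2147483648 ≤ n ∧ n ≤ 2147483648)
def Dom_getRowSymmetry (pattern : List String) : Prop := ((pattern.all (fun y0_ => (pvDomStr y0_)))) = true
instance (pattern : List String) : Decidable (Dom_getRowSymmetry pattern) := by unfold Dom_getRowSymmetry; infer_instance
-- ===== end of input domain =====

-- B replaces A's inner expand-outward while-loop by a single reversed-slice comparison per
-- candidate axis, picked with next(..., 0): simpler, same asymptotic cost.

-- ===== PORT A =====
-- A's inner 'while True' loop; fuel bounds the remaining iterations (the loop returns or
-- breaks before j reaches i, so fuel = i at j = 0 suffices and the fuel-0 branch is never hit).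
-- Python's indices i-j-1 and i+j stay in range while the loop runs, so getD is exact there;
-- the Python test '(i - j - 1) == -1' (after the increment) is 'j' = i'.
def aInner (p : List String) (n i : Nat) : Nat → Nat → Option Int
  | 0, _ => none
  | fuel + 1, j =>
    if p.getD (i - j - 1) "" ≠ p.getD (i + j) "" then none        -- break
    else
      let j' := j + 1
      if j' = i ∨ i + j' = n then some (i : Int)                  -- return i
      else aInner p n i fuel j'

-- A's outer 'for i in range(1, len(pattern))' loop; falls through to 'return 0'
def aOuter (p : List String) (n : Nat) (i : Nat) : Int :=
  if _h : i < n then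
    match aInner p n i i 0 with
    | some r => r
    | none => aOuter p n (i + 1)
  else 0
termination_by n - i

def getRowSymmetry (pattern : List String) : Int :=
  aOuter pattern pattern.length 1

-- ===== PORT B =====
-- pattern[i-1] == pattern[i] and pattern[i-k:i][::-1] == pattern[i:i+k]  with k = min(i, n-i)
-- ([::-1] is List.reverse, cf. PySem.List.slice?_none_none_neg_one); indices i-1, i are in
-- range for 1 <= i < n, so getD is exact
def bCheck (p : List String) (n i : Nat) : Bool :=
  let k := min i (n - i)
  (p.getD (i - 1) "" == p.getD i "") &&
  (PySem.List.slice p (some ((i - k : Nat) : Int)) (some (i : Int))).reverse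
    == PySem.List.slice p (some (i : Int)) (some ((i + k : Nat) : Int))

-- next((i for i in range(1, n) if ...), 0)
def getRowSymmetry_alt (pattern : List String) : Int :=
  let n := pattern.length
  ((((List.range' 1 (n - 1)).find? (fun i => bCheck pattern n i)).map
      (fun i => (i : Int))).getD 0)

-- ===== PRECONDITION & SPEC =====
def Spec_getRowSymmetry (pattern : List String) (out : Int) : Prop := out = getRowSymmetry_alt pattern
instance (pattern : List String) (out : Int) : Decidable (Spec_getRowSymmetry pattern out) := by unfold Spec_getRowSymmetry; infer_instance

-- ===== CLAIM (what is proved, stated in full; the proofs are below) =====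
def Claim_equal_getRowSymmetry : Prop := ∀ (pattern : List String), Dom_getRowSymmetry pattern → Spec_getRowSymmetry pattern (getRowSymmetry pattern)

-- ===== LEMMAS AND PROOFS =====

-- 'the k rows above axis i mirror the k rows below it'
def Mirror (p : List String) (i k : Nat) : Prop :=
  ∀ t, t < k → p.getD (i - 1 - t) "" = p.getD (i + t) ""

-- B's slice comparison at axis i tests exactly the Mirror property
lemma bCheck_iff (p : List String) (i : Nat) (h1 : 1 ≤ i) (h2 : i < p.length) :
    bCheck p p.length i = true ↔ Mirror p i (min i (p.length - i)) := by
  set k := min i (p.length - i) with hkdef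
  have hk1 : k ≤ i := min_le_left _ _
  have hk2 : i + k ≤ p.length := by omega
  have hL : PySem.List.slice p (some ((i - k : Nat) : Int)) (some ((i : Nat) : Int))
      = (p.drop (i - k)).take k := by
    rw [PySem.List.slice_natCast]; congr 1; omega
  have hR : PySem.List.slice p (some ((i : Nat) : Int)) (some ((i + k : Nat) : Int))
      = (p.drop i).take k := by
    rw [PySem.List.slice_natCast]; congr 1; omega
  have hlen : ((p.drop (i - k)).take k).length = k := by
    simp [List.length_take, List.length_drop]; omega
  have hgetL : ∀ t, t < k → (((p.drop (i - k)).take k).reverse)[t]? = p[i - 1 - t]? := by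
    intro t ht
    rw [List.getElem?_reverse (by rw [hlen]; exact ht)]
    rw [hlen, List.getElem?_take, if_pos (by omega), List.getElem?_drop]
    congr 1; omega
  have hgetR : ∀ t, t < k → ((p.drop i).take k)[t]? = p[i + t]? := by
    intro t ht
    rw [List.getElem?_take, if_pos ht, List.getElem?_drop]
  have hbc : bCheck p p.length i = true ↔
      (p.getD (i - 1) "" = p.getD i "" ∧
        ((p.drop (i - k)).take k).reverse = (p.drop i).take k) := by
    simp only [bCheck, ← hkdef, hL, hR, Bool.and_eq_true, beq_iff_eq]
  rw [hbc]
  constructor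
  · intro hpair t ht
    have h := hpair.2
    have := congrArg (fun l => l[t]?) h
    simp only [hgetL t ht, hgetR t ht] at this
    simpa [List.getD_eq_getElem?_getD] using congrArg (fun o => o.getD "") this
  · intro h
    refine ⟨by simpa using h 0 (by omega), ?_⟩
    apply List.ext_getElem?
    intro m
    by_cases hm : m < k
    · rw [hgetL m hm, hgetR m hm]
      have e1 : i - 1 - m < p.length := by omega
      have e2 : i + m < p.length := by omega
      rw [List.getElem?_eq_getElem e1, List.getElem?_eq_getElem e2]
      have := h m hm
      rw [List.getD_eq_getElem p "" e1, List.getD_eq_getElem p "" e2] at this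
      exact congrArg some this
    · rw [List.getElem?_eq_none (by rw [List.length_reverse, hlen]; omega),
          List.getElem?_eq_none (by simp [List.length_take, List.length_drop]; omega)]

-- A's inner loop, started at j with enough fuel, returns some i iff all remaining pairs mirror
lemma aInner_char (p : List String) (i : Nat) (_h1 : 1 ≤ i) (h2 : i < p.length) :
    ∀ (fuel j : Nat), j < min i (p.length - i) → min i (p.length - i) - j ≤ fuel →
      aInner p p.length i fuel j =
        (if ∀ t, j ≤ t → t < min i (p.length - i) →
            p.getD (i - 1 - t) "" = p.getD (i + t) "" then some (i : Int) else none) := by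
  intro fuel
  induction fuel with
  | zero => intro j hj hf; omega
  | succ fuel ih =>
    intro j hj hf
    set k := min i (p.length - i) with hkdef
    simp only [aInner]
    have hidx : i - j - 1 = i - 1 - j := by omega
    by_cases hm : p.getD (i - j - 1) "" = p.getD (i + j) ""
    · rw [if_neg (by simpa using hm)]
      by_cases hstop : j + 1 = k
      · rw [if_pos (by omega)]
        rw [if_pos]
        intro t h1t h2t
        have : t = j := by omega
        subst this
        rw [← hidx]; exact hm
      · rw [if_neg (by omega)]
        rw [ih (j + 1) (by omega) (by omega)]
        have hiff : (∀ t, j + 1 ≤ t → t < k → p.getD (i - 1 - t) "" = p.getD (i + t) "")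
            ↔ (∀ t, j ≤ t → t < k → p.getD (i - 1 - t) "" = p.getD (i + t) "") := by
          constructor
          · intro H t hjt htk
            rcases Nat.eq_or_lt_of_le hjt with h | h
            · subst h; rw [← hidx]; exact hm
            · exact H t h htk
          · intro H t hjt htk; exact H t (by omega) htk
        rw [if_congr hiff rfl rfl]
    · rw [if_pos (by simpa using hm)]
      rw [if_neg]
      intro H
      exact hm (by rw [hidx]; exact H j le_rfl hj)

-- A's outer loop from i equals B's find? over the remaining candidates
lemma aOuter_eq (p : List String) :
    ∀ (i : Nat), 1 ≤ i →
      aOuter p p.length i =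
        ((((List.range' i (p.length - i)).find? (fun m => bCheck p p.length m)).map
            (fun m => (m : Int))).getD 0) := by
  suffices H : ∀ (d i : Nat), p.length - i = d → 1 ≤ i →
      aOuter p p.length i =
        ((((List.range' i (p.length - i)).find? (fun m => bCheck p p.length m)).map
            (fun m => (m : Int))).getD 0) by
    intro i hi; exact H (p.length - i) i rfl hi
  intro d
  induction d with
  | zero =>
    intro i hd hi
    rw [aOuter, dif_neg (by omega), hd]
    simp
  | succ d ih =>
    intro i hd hi
    have hlt : i < p.length := by omega
    have hinner := aInner_char p i hi hlt i 0 (by omega) (by omega)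
    rw [aOuter, dif_pos hlt, hinner]
    by_cases hb : bCheck p p.length i = true
    · rw [if_pos (fun t _ ht => ((bCheck_iff p i hi hlt).mp hb) t ht)]
      rw [hd, List.range'_succ, List.find?_cons, hb]
      simp
    · rw [if_neg (fun H => hb ((bCheck_iff p i hi hlt).mpr (fun t ht => H t (Nat.zero_le t) ht)))]
      rw [ih (i + 1) (by omega) (by omega)]
      simp only [Bool.not_eq_true] at hb
      rw [hd, List.range'_succ, List.find?_cons, hb]
      have : p.length - (i + 1) = d := by omega
      rw [this]

-- ===== VERDICT (by name: the statement is the Claim_ definition above) =====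
theorem getRowSymmetry_spec : Claim_equal_getRowSymmetry := by
  intro pattern _
  unfold Spec_getRowSymmetry getRowSymmetry getRowSymmetry_alt
  simpa using aOuter_eq pattern 1 le_rfl
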